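-- pv_equiv track=rewrite | github.com/suleimanelkhoury/ec-scheduling | optimization_method/PSO.py | chunk_with_service_index
-- ===== SOURCE A (Python) =====
-- def chunk_with_service_index(pop, num_chunks):
--     chunk_size = len(pop) // num_chunks
--     remainder = len(pop) % num_chunks
--
--     chunks = []
--     start = 0
--     for i in range(num_chunks):
--         end = start + chunk_size + (1 if i < remainder else 0)
--         chunks.append((pop[start:end], i + 1))
--         start = end
--     return chunks
-- ===== SOURCE B (Python) =====
-- def chunk_with_service_index(pop, num_chunks):
--     chunk_size = len(pop) // num_chunks
--     remainder = len(pop) % num_chunks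
--     big = (chunk_size + 1) * remainder
--     groups = {}
--     for j, x in enumerate(pop):
--         if j < big:
--             owner = j // (chunk_size + 1)
--         else:
--             owner = remainder + (j - big) // chunk_size
--         groups.setdefault(owner, []).append(x)
--     return [(groups.get(i, []), i + 1) for i in range(num_chunks)]
-- ===== Notes on version B (the rewrite author's own statement) =====
-- stated objective: alternative
-- what changed: Instead of slicing the list chunk by chunk with a carried start offset, B makes one pass over enumerate(pop), computes each element's owning chunk index by closed-form division, groups elements into a dict, and reads the chunks back from the dict.
import Mathlib
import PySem

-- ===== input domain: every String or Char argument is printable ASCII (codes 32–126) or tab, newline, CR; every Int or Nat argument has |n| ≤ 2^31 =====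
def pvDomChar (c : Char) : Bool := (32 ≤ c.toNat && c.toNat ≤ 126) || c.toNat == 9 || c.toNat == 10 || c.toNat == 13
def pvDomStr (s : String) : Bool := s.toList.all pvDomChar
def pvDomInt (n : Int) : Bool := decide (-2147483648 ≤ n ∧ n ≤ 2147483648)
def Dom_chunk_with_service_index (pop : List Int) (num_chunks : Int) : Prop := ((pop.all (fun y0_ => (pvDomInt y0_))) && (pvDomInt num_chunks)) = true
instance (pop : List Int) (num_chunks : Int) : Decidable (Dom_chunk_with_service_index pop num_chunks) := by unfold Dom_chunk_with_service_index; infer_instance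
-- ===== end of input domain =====

-- B replaces A's chunk-by-chunk slicing with a carried start offset by a single pass over the
-- elements: each element's owning chunk index is computed by closed-form division and the
-- chunks are grouped in a dict; alternative algorithm, same cost.

-- ===== PORT A =====
def chunk_with_service_index (pop : List Int) (num_chunks : Int) : List (List Int × Int) :=
  let chunk_size := PySem.Int.floordiv (pop.length : Int) num_chunks
  let remainder := PySem.Int.mod (pop.length : Int) num_chunks
  let st := (PySem.List.pyRange 0 num_chunks 1).foldl
    (fun (st : List (List Int × Int) × Int) i =>
      let e := st.2 + chunk_size + (if i < remainder then (1 : Int) else 0)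
      (st.1 ++ [(PySem.List.slice pop (some st.2) (some e), i + 1)], e))
    ([], 0)
  st.1

-- ===== PORT B =====
def chunk_with_service_index_alt (pop : List Int) (num_chunks : Int) : List (List Int × Int) :=
  let chunk_size := PySem.Int.floordiv (pop.length : Int) num_chunks
  let remainder := PySem.Int.mod (pop.length : Int) num_chunks
  let big := (chunk_size + 1) * remainder
  -- groups.setdefault(owner, []).append(x)  =  Dict.modify owner [] (· ++ [x])
  let groups := (PySem.List.enumerate pop 0).foldl
    (fun (d : PySem.Dict Int (List Int)) p =>
      let owner := if p.1 < big then PySem.Int.floordiv p.1 (chunk_size + 1)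
                   else remainder + PySem.Int.floordiv (p.1 - big) chunk_size
      d.modify owner [] (· ++ [p.2]))
    PySem.Dict.empty
  (PySem.List.pyRange 0 num_chunks 1).map (fun i => (groups.getD i [], i + 1))

-- ===== PRECONDITION & SPEC =====
-- Pre_ excludes only num_chunks = 0, where A raises ZeroDivisionError (len(pop) // 0).
def Pre_chunk_with_service_index (pop : List Int) (num_chunks : Int) : Prop := num_chunks ≠ 0
instance (pop : List Int) (num_chunks : Int) : Decidable (Pre_chunk_with_service_index pop num_chunks) := by unfold Pre_chunk_with_service_index; infer_instance
def pvWitness_chunk_with_service_index : List Int × Int := ([1, 2, 3, 4, 5], 3)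
def Spec_chunk_with_service_index (pop : List Int) (num_chunks : Int) (out : List (List Int × Int)) : Prop := out = chunk_with_service_index_alt pop num_chunks
instance (pop : List Int) (num_chunks : Int) (out : List (List Int × Int)) : Decidable (Spec_chunk_with_service_index pop num_chunks out) := by unfold Spec_chunk_with_service_index; infer_instance

-- ===== CLAIM =====
def Claim_equal_chunk_with_service_index : Prop := ∀ (pop : List Int) (num_chunks : Int), Dom_chunk_with_service_index pop num_chunks → Pre_chunk_with_service_index pop num_chunks → Spec_chunk_with_service_index pop num_chunks (chunk_with_service_index pop num_chunks)

-- ===== LEMMAS AND PROOFS =====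

-- Closed-form chunk boundary: chunk i starts at pvBnd cs r i = i*cs + min i r.
def pvBnd (cs r i : Int) : Int := i * cs + min i r

-- B's grouping fold, named for the proofs.
def pvGroups (pop : List Int) (cs r big : Int) : PySem.Dict Int (List Int) :=
  (PySem.List.enumerate pop 0).foldl
    (fun (d : PySem.Dict Int (List Int)) p =>
      d.modify (if p.1 < big then PySem.Int.floordiv p.1 (cs + 1)
                else r + PySem.Int.floordiv (p.1 - big) cs) [] (· ++ [p.2]))
    PySem.Dict.empty

-- A's fold invariant: after n iterations the accumulator holds the first n closed-form
-- slices and the carried start equals pvBnd cs r n.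
lemma fold_invariant (pop : List Int) (cs r : Int) (hr : 0 ≤ r) (n : Nat) :
    (PySem.List.pyRange 0 (n : Int) 1).foldl
      (fun (st : List (List Int × Int) × Int) i =>
        let e := st.2 + cs + (if i < r then (1 : Int) else 0)
        (st.1 ++ [(PySem.List.slice pop (some st.2) (some e), i + 1)], e))
      ([], 0)
    = ((PySem.List.pyRange 0 (n : Int) 1).map
        (fun i => (PySem.List.slice pop (some (pvBnd cs r i)) (some (pvBnd cs r (i + 1))), i + 1)),
       pvBnd cs r (n : Int)) := by
  induction n with
  | zero => simp [PySem.List.pyRange_one_eq_nil, pvBnd, min_eq_left hr]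
  | succ m ih =>
      have h : ((m : Int) + 1) = ((m + 1 : Nat) : Int) := by push_cast; ring
      rw [← h, PySem.List.pyRange_one_succ_right (by positivity), List.foldl_append,
          List.map_append, ih]
      simp only [List.foldl_cons, List.foldl_nil, List.map_cons, List.map_nil]
      have key : pvBnd cs r (m : Int) + cs + (if (m : Int) < r then (1 : Int) else 0)
          = pvBnd cs r ((m : Int) + 1) := by
        unfold pvBnd
        by_cases hlt : (m : Int) < r
        · rw [min_eq_left (by omega), min_eq_left (by omega), if_pos hlt]; ring
        · rw [min_eq_right (by omega), min_eq_right (by omega), if_neg hlt]; ring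
      rw [key]

-- The boundary is monotone in the chunk index.
lemma pvBnd_mono (cs r : Int) (hcs : 0 ≤ cs) {i j : Int} (h : i ≤ j) :
    pvBnd cs r i ≤ pvBnd cs r j := by
  have := mul_le_mul_of_nonneg_right h hcs
  unfold pvBnd; omega

-- B's owner formula lands element j exactly in the chunk whose slice covers j.
lemma owner_correct (nc cs r big j : Int) (hnc : 0 < nc) (hcs : 0 ≤ cs)
    (hr : 0 ≤ r) (hrn : r < nc) (hbig : big = (cs + 1) * r)
    (hj0 : 0 ≤ j) (hjn : j < cs * nc + r) :
    let o := if j < big then PySem.Int.floordiv j (cs + 1)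
             else r + PySem.Int.floordiv (j - big) cs
    0 ≤ o ∧ o < nc ∧ pvBnd cs r o ≤ j ∧ j < pvBnd cs r (o + 1) := by
  intro o
  by_cases hb : j < big
  · have hd : (0:Int) < cs + 1 := by omega
    set q := PySem.Int.floordiv j (cs + 1) with hq
    have hdm : q * (cs + 1) + PySem.Int.mod j (cs + 1) = j := PySem.Int.floordiv_mul_add_mod j (cs + 1)
    have hm0 : 0 ≤ PySem.Int.mod j (cs + 1) := PySem.Int.mod_nonneg j hd
    have hm1 : PySem.Int.mod j (cs + 1) < cs + 1 := PySem.Int.mod_lt j hd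
    have hq0 : 0 ≤ q := by
      rcases lt_or_ge q 0 with h | h
      · exfalso; nlinarith
      · exact h
    have hqr : q < r := by
      rcases lt_or_ge q r with h | h
      · exact h
      · exfalso; nlinarith
    have ho : o = q := if_pos hb
    rw [ho]
    refine ⟨hq0, by omega, ?_, ?_⟩
    · unfold pvBnd; rw [min_eq_left (by omega)]; nlinarith
    · unfold pvBnd; rw [min_eq_left (by omega)]; nlinarith
  · push Not at hb
    have hcs1 : 0 < cs := by
      rcases lt_or_ge 0 cs with h | h
      · exact h
      · exfalso; nlinarith
    set q := PySem.Int.floordiv (j - big) cs with hq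
    have hdm : q * cs + PySem.Int.mod (j - big) cs = j - big := PySem.Int.floordiv_mul_add_mod (j - big) cs
    have hm0 : 0 ≤ PySem.Int.mod (j - big) cs := PySem.Int.mod_nonneg _ hcs1
    have hm1 : PySem.Int.mod (j - big) cs < cs := PySem.Int.mod_lt _ hcs1
    have hq0 : 0 ≤ q := by
      rcases lt_or_ge q 0 with h | h
      · exfalso; nlinarith
      · exact h
    have hqr : q < nc - r := by
      rcases lt_or_ge q (nc - r) with h | h
      · exact h
      · exfalso; nlinarith
    have ho : o = r + q := if_neg (by omega)
    rw [ho]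
    refine ⟨by omega, by omega, ?_, ?_⟩
    · unfold pvBnd; rw [min_eq_right (by omega)]; nlinarith
    · unfold pvBnd; rw [min_eq_right (by omega)]; nlinarith

-- For an in-range chunk index i: owner j = i iff pvBnd i ≤ j < pvBnd (i+1).
lemma owner_eq_iff (nc cs r big j i : Int) (hnc : 0 < nc) (hcs : 0 ≤ cs)
    (hr : 0 ≤ r) (hrn : r < nc) (hbig : big = (cs + 1) * r)
    (hj0 : 0 ≤ j) (hjn : j < cs * nc + r) (hi0 : 0 ≤ i) (hin : i < nc) :
    ((if j < big then PySem.Int.floordiv j (cs + 1)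
      else r + PySem.Int.floordiv (j - big) cs) = i)
    ↔ (pvBnd cs r i ≤ j ∧ j < pvBnd cs r (i + 1)) := by
  obtain ⟨ho0, hon, hlo, hhi⟩ := owner_correct nc cs r big j hnc hcs hr hrn hbig hj0 hjn
  set o := if j < big then PySem.Int.floordiv j (cs + 1)
           else r + PySem.Int.floordiv (j - big) cs with ho
  constructor
  · rintro rfl; exact ⟨hlo, hhi⟩
  · rintro ⟨h1, h2⟩
    by_contra hne
    rcases lt_or_gt_of_ne hne with hlt | hgt
    · have := pvBnd_mono cs r hcs (show o + 1 ≤ i by omega); omega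
    · have := pvBnd_mono cs r hcs (show i + 1 ≤ o by omega); omega

-- Filtering enumerate by an index interval is a drop/take segment.
lemma filter_enumerate_interval {α : Type} (xs : List α) (s a b : Nat) :
    ((PySem.List.enumerate xs (s : Int)).filter
        (fun p => decide ((a : Int) ≤ p.1 ∧ p.1 < (b : Int)))).map (·.2)
      = (xs.drop (a - s)).take ((b - s) - (a - s)) := by
  induction xs generalizing s with
  | nil => simp [PySem.List.enumerate_nil]
  | cons x xs ih =>
      rw [PySem.List.enumerate_cons]
      by_cases ha : (a : Int) ≤ (s : Int)
      · by_cases hb : (s : Int) < (b : Int)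
        · have : ((s : Int) + 1) = ((s + 1 : Nat) : Int) := by push_cast; ring
          rw [List.filter_cons]
          simp only [decide_eq_true_eq, if_pos (show (a : Int) ≤ (s:Int) ∧ (s:Int) < b from ⟨ha, hb⟩)]
          rw [List.map_cons, this, ih (s + 1)]
          have h1 : a - s = 0 := by omega
          have h2 : a - (s + 1) = 0 := by omega
          rw [h1, h2]
          simp only [List.drop_zero]
          have h3 : (b - s) - 0 = ((b - (s+1)) - 0) + 1 := by omega
          rw [h3, List.take_succ_cons]
        · rw [List.filter_cons]
          simp only [decide_eq_true_eq]
          rw [if_neg (by omega)]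
          have : ((s : Int) + 1) = ((s + 1 : Nat) : Int) := by push_cast; ring
          rw [this, ih (s + 1)]
          have h2 : (b - s) - (a - s) = 0 := by omega
          have h3 : (b - (s+1)) - (a - (s+1)) = 0 := by omega
          rw [h2, h3]
          simp
      · rw [List.filter_cons]
        simp only [decide_eq_true_eq]
        rw [if_neg (by omega)]
        have : ((s : Int) + 1) = ((s + 1 : Nat) : Int) := by push_cast; ring
        rw [this, ih (s + 1)]
        have h1 : a - s = (a - (s+1)) + 1 := by omega
        rw [h1, List.drop_succ_cons]
        congr 1
        omega

-- The dict built by B holds, at key i, exactly the slice A produces for chunk i.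
lemma groups_getD (pop : List Int) (nc cs r : Int) (hnc : 0 < nc) (hcs : 0 ≤ cs)
    (hr : 0 ≤ r) (hrn : r < nc) (hsum : cs * nc + r = (pop.length : Int))
    (i : Int) (hi0 : 0 ≤ i) (hin : i < nc) :
    (pvGroups pop cs r ((cs + 1) * r)).getD i []
      = PySem.List.slice pop (some (pvBnd cs r i)) (some (pvBnd cs r (i + 1))) := by
  have hbnd0 : ∀ k : Int, 0 ≤ k → 0 ≤ pvBnd cs r k := by
    intro k hk
    have := mul_nonneg hk hcs
    unfold pvBnd; omega
  set a := (pvBnd cs r i).toNat with ha_def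
  set b := (pvBnd cs r (i + 1)).toNat with hb_def
  have ha : (a : Int) = pvBnd cs r i := by
    have := hbnd0 i hi0; omega
  have hb : (b : Int) = pvBnd cs r (i + 1) := by
    have := hbnd0 (i + 1) (by omega); omega
  have hfold : pvGroups pop cs r ((cs + 1) * r)
      = ((PySem.List.enumerate pop 0).map
          (fun p => ((if p.1 < (cs + 1) * r then PySem.Int.floordiv p.1 (cs + 1)
                      else r + PySem.Int.floordiv (p.1 - (cs + 1) * r) cs), p.2))).foldl
          (fun (d : PySem.Dict Int (List Int)) q => d.modify q.1 [] (· ++ [q.2]))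
          PySem.Dict.empty := Eq.symm List.foldl_map
  rw [hfold, PySem.Dict.getD_foldl_modify_append, PySem.Dict.getD_empty, List.nil_append,
      List.filter_map, List.map_map]
  have hcong : ∀ x ∈ PySem.List.enumerate pop 0,
      (((fun q : Int × Int => q.1 == i) ∘
        (fun p : Int × Int => ((if p.1 < (cs + 1) * r then PySem.Int.floordiv p.1 (cs + 1)
                    else r + PySem.Int.floordiv (p.1 - (cs + 1) * r) cs), p.2))) x)
      = decide ((a : Int) ≤ x.1 ∧ x.1 < (b : Int)) := by
    intro x hx
    obtain ⟨k, hk, rfl⟩ := (PySem.List.mem_enumerate_iff _ _ _).mp hx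
    simp only [Function.comp_def, zero_add]
    rw [Bool.eq_iff_iff]
    simp only [beq_iff_eq, decide_eq_true_eq]
    rw [ha, hb]
    exact owner_eq_iff nc cs r ((cs + 1) * r) (k : Int) i hnc hcs hr hrn rfl
      (by positivity) (by rw [hsum]; exact_mod_cast hk) hi0 hin
  rw [List.filter_congr hcong]
  have hmap : ((PySem.List.enumerate pop 0).filter
        (fun x => decide ((a : Int) ≤ x.1 ∧ x.1 < (b : Int)))).map
        ((fun q : Int × Int => q.2) ∘
         (fun p : Int × Int => ((if p.1 < (cs + 1) * r then PySem.Int.floordiv p.1 (cs + 1)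
                     else r + PySem.Int.floordiv (p.1 - (cs + 1) * r) cs), p.2)))
      = ((PySem.List.enumerate pop 0).filter
        (fun x => decide ((a : Int) ≤ x.1 ∧ x.1 < (b : Int)))).map (·.2) := by
    simp [Function.comp_def]
  rw [hmap]
  have h0 : ((0 : Nat) : Int) = (0 : Int) := by norm_num
  have := filter_enumerate_interval pop 0 a b
  rw [h0] at this
  rw [this, ← ha, ← hb, PySem.List.slice_natCast]
  simp

-- The two ports agree (the Lean ports are total; Pre_ matters only for Python A).
lemma ports_eq (pop : List Int) (nc : Int) :
    chunk_with_service_index pop nc = chunk_with_service_index_alt pop nc := by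
  by_cases hpos : 0 < nc
  · have hcast : nc = (nc.toNat : Int) := by omega
    rw [hcast]
    set N := nc.toNat with hN
    have hNpos : (0 : Int) < (N : Int) := by omega
    set cs := PySem.Int.floordiv (pop.length : Int) (N : Int) with hcs_def
    set r := PySem.Int.mod (pop.length : Int) (N : Int) with hr_def
    have hr0 : 0 ≤ r := PySem.Int.mod_nonneg _ hNpos
    have hrn : r < (N : Int) := PySem.Int.mod_lt _ hNpos
    have hsum : cs * (N : Int) + r = (pop.length : Int) := by
      rw [hcs_def, hr_def]; exact PySem.Int.floordiv_mul_add_mod _ _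
    have hcs0 : 0 ≤ cs := by
      rcases lt_or_ge cs 0 with h | h
      · exfalso
        have hlen : (0 : Int) ≤ (pop.length : Int) := by positivity
        nlinarith
      · exact h
    have hA : chunk_with_service_index pop (N : Int)
        = (PySem.List.pyRange 0 (N : Int) 1).map
            (fun i => (PySem.List.slice pop (some (pvBnd cs r i)) (some (pvBnd cs r (i + 1))), i + 1)) := by
      unfold chunk_with_service_index
      exact congrArg Prod.fst (fold_invariant pop cs r hr0 N)
    have hB : chunk_with_service_index_alt pop (N : Int)
        = (PySem.List.pyRange 0 (N : Int) 1).map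
            (fun i => ((pvGroups pop cs r ((cs + 1) * r)).getD i [], i + 1)) := rfl
    rw [hA, hB]
    refine List.map_congr_left ?_
    intro i hi
    have hmem := PySem.List.mem_pyRange_one.mp hi
    have := groups_getD pop (N : Int) cs r hNpos hcs0 hr0 hrn hsum i (by omega) (by omega)
    rw [this]
  · have hle : nc ≤ 0 := by omega
    unfold chunk_with_service_index chunk_with_service_index_alt
    rw [PySem.List.pyRange_one_eq_nil hle]
    simp

-- ===== VERDICT =====
theorem chunk_with_service_index_spec : Claim_equal_chunk_with_service_index := by
  intro pop num_chunks _ _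
  unfold Spec_chunk_with_service_index
  exact ports_eq pop num_chunks
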